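-- pv_equiv track=rewrite | github.com/deepikasp18/pharma-guide | src/nlp/llm_response_generator.py | _format_side_effects_response
-- ===== SOURCE A (Python) =====
-- from typing import List, Dict, Any, Optional
--
-- def _format_side_effects_response(
--
--     drug_entities: List[Dict[str, Any]],
--     results: List[Dict[str, Any]]
-- ) -> str:
--     """Format side effects response"""
--
--     drug_name = drug_entities[0]['text'] if drug_entities else "this medication"
--
--     response = f"Here are the known side effects of {drug_name}:\n\n"
--
--     # Group by severity
--     by_severity = {}
--     for result in results:
--         if result.get('type') == 'side_effect':
--             severity = result.get('severity', 'unknown')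
--             if severity not in by_severity:
--                 by_severity[severity] = []
--             by_severity[severity].append(result)
--
--     # Format by severity
--     severity_order = ['major', 'moderate', 'minor']
--     for severity in severity_order:
--         if severity in by_severity:
--             response += f"**{severity.title()} Side Effects:**\n"
--             for effect in by_severity[severity]:
--                 name = effect.get('name', 'Unknown')
--                 frequency = effect.get('frequency', 'unknown frequency')
--                 description = effect.get('description', '')
--
--                 response += f"- {name} ({frequency})"
--                 if description:
--                     response += f": {description}"
--                 response += "\n"
--             response += "\n"
--
--     return response.strip()
-- ===== SOURCE B (Python) =====
-- def _format_side_effects_response(drug_entities, results):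
--     """Format side effects response (no grouping dict: one filtering pass per severity)."""
--     drug_name = drug_entities[0]['text'] if drug_entities else "this medication"
--
--     response = f"Here are the known side effects of {drug_name}:\n\n"
--
--     for severity in ('major', 'moderate', 'minor'):
--         matches = [r for r in results
--                    if r.get('type') == 'side_effect'
--                    and r.get('severity', 'unknown') == severity]
--         if matches:
--             response += f"**{severity.title()} Side Effects:**\n"
--             for effect in matches:
--                 name = effect.get('name', 'Unknown')
--                 frequency = effect.get('frequency', 'unknown frequency')
--                 description = effect.get('description', '')
--
--                 response += f"- {name} ({frequency})"
--                 if description: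
--                     response += f": {description}"
--                 response += "\n"
--             response += "\n"
--
--     return response.strip()
-- ===== Notes on version B (the rewrite author's own statement) =====
-- stated objective: simpler
-- what changed: B drops the grouping dict entirely: it loops over the fixed severity order and, per severity, filters the results list directly (type=='side_effect' and matching severity), emitting each section as it goes; Pre_ excludes only the inputs where both A and B raise KeyError (nonempty drug_entities whose first dict lacks 'text').
import Mathlib
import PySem

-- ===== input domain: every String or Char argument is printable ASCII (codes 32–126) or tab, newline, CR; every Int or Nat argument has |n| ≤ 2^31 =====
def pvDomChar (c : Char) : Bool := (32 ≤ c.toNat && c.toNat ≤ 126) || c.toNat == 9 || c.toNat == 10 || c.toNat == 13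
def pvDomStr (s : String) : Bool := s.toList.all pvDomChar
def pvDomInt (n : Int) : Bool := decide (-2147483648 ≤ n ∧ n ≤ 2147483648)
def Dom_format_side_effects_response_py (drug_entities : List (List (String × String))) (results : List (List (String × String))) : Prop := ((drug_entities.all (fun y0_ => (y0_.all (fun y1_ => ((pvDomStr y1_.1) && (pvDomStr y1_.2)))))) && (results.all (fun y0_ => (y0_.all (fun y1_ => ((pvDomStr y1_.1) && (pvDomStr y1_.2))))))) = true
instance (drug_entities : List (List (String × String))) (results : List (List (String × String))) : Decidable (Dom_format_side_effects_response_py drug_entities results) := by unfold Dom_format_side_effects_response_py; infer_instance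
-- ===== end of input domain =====

-- B replaces A's grouping dict with one filtering pass of the results list per severity ('simpler': no index maintained).
-- Shared helpers: dict-style lookup on an association list (first match, Python dict semantics) and the
-- effect-line formatting both Pythons contain verbatim.

def pvEntryGet? (r : List (String × String)) (k : String) : Option String :=
  PySem.Dict.get? (PySem.Dict.mk r) k

def pvEntryGetD (r : List (String × String)) (k d : String) : String :=
  (pvEntryGet? r k).getD d

-- str.title() — exact on ASCII letters (the only arguments here are the literals "major"/"moderate"/"minor")
def pvTitleChars : Bool → List Char → List Char
  | _, [] => []
  | start, c :: cs =>
    (if start then PySem.Chars.upperChar c else PySem.Chars.lowerChar c) ::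
      pvTitleChars (!PySem.Chars.isalpha c) cs

def pvTitle (s : String) : String := String.ofList (pvTitleChars true s.toList)

-- the per-effect formatting lines (identical in both Pythons)
def pvFmtEffect (effect : List (String × String)) : String :=
  let name := pvEntryGetD effect "name" "Unknown"
  let frequency := pvEntryGetD effect "frequency" "unknown frequency"
  let description := pvEntryGetD effect "description" ""
  let line := "- " ++ name ++ " (" ++ frequency ++ ")"
  let line := if description = "" then line else line ++ ": " ++ description
  line ++ "\n"

-- ===== PORT A =====
-- drug_entities[0]['text'] raises KeyError when 'text' is missing: excluded by Pre_; the .getD default is unreachable there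
def format_side_effects_response_py (drug_entities : List (List (String × String))) (results : List (List (String × String))) : String :=
  let drug_name : String :=
    match drug_entities with
    | [] => "this medication"
    | d :: _ => (pvEntryGet? d "text").getD "this medication"
  let response := "Here are the known side effects of " ++ drug_name ++ ":\n\n"
  let by_severity : PySem.Dict String (List (List (String × String))) :=
    results.foldl (fun d result =>
      if pvEntryGet? result "type" == some "side_effect" then
        let severity := pvEntryGetD result "severity" "unknown"
        let d := if d.contains severity then d else d.insert severity []
        d.modify severity [] (fun l => l ++ [result])
      else d) PySem.Dict.empty
  let response :=
    ["major", "moderate", "minor"].foldl (fun resp severity =>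
      if by_severity.contains severity then
        let resp := resp ++ "**" ++ pvTitle severity ++ " Side Effects:**\n"
        let resp := (by_severity.getD severity []).foldl (fun r e => r ++ pvFmtEffect e) resp
        resp ++ "\n"
      else resp) response
  PySem.Str.strip response

-- ===== PORT B =====
def format_side_effects_response_py_alt (drug_entities : List (List (String × String))) (results : List (List (String × String))) : String :=
  let drug_name : String :=
    match drug_entities with
    | [] => "this medication"
    | d :: _ => (pvEntryGet? d "text").getD "this medication"
  let response := "Here are the known side effects of " ++ drug_name ++ ":\n\n"
  let response :=
    ["major", "moderate", "minor"].foldl (fun resp severity =>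
      let matched := results.filter (fun r =>
        (pvEntryGet? r "type" == some "side_effect") &&
        (pvEntryGetD r "severity" "unknown" == severity))
      if !matched.isEmpty then
        let resp := resp ++ "**" ++ pvTitle severity ++ " Side Effects:**\n"
        let resp := matched.foldl (fun r e => r ++ pvFmtEffect e) resp
        resp ++ "\n"
      else resp) response
  PySem.Str.strip response

-- ===== PRECONDITION & SPEC =====
-- Pre_ excludes exactly the inputs where A raises KeyError: a nonempty drug_entities whose first dict lacks 'text'
def Pre_format_side_effects_response_py (drug_entities : List (List (String × String))) (results : List (List (String × String))) : Prop :=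
  (match drug_entities with
   | [] => true
   | d :: _ => (pvEntryGet? d "text").isSome) = true
instance (drug_entities : List (List (String × String))) (results : List (List (String × String))) : Decidable (Pre_format_side_effects_response_py drug_entities results) := by unfold Pre_format_side_effects_response_py; infer_instance

def pvWitness_format_side_effects_response_py : (List (List (String × String))) × (List (List (String × String))) :=
  ([[("text", "Aspirin")]], [[("type", "side_effect"), ("severity", "major"), ("name", "Nausea")]])

def Spec_format_side_effects_response_py (drug_entities : List (List (String × String))) (results : List (List (String × String))) (out : String) : Prop := out = format_side_effects_response_py_alt drug_entities results
instance (drug_entities : List (List (String × String))) (results : List (List (String × String))) (out : String) : Decidable (Spec_format_side_effects_response_py drug_entities results out) := by unfold Spec_format_side_effects_response_py; infer_instance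

-- ===== CLAIM (what is proved, stated in full; the proofs are below) =====
def Claim_equal_format_side_effects_response_py : Prop := ∀ (drug_entities : List (List (String × String))) (results : List (List (String × String))), Dom_format_side_effects_response_py drug_entities results → Pre_format_side_effects_response_py drug_entities results → Spec_format_side_effects_response_py drug_entities results (format_side_effects_response_py drug_entities results)

-- ===== LEMMAS AND PROOFS =====

def pvPred (sev : String) (r : List (String × String)) : Bool :=
  (pvEntryGet? r "type" == some "side_effect") && (pvEntryGetD r "severity" "unknown" == sev)

def pvStep (d : PySem.Dict String (List (List (String × String)))) (result : List (String × String)) :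
    PySem.Dict String (List (List (String × String))) :=
  if pvEntryGet? result "type" == some "side_effect" then
    let severity := pvEntryGetD result "severity" "unknown"
    let d := if d.contains severity then d else d.insert severity []
    d.modify severity [] (fun l => l ++ [result])
  else d

theorem pvStep_getD (d : PySem.Dict String (List (List (String × String))))
    (r : List (String × String)) (sev : String) :
    (pvStep d r).getD sev [] = if pvPred sev r then d.getD sev [] ++ [r] else d.getD sev [] := by
  unfold pvStep pvPred
  by_cases ht : (pvEntryGet? r "type" == some "side_effect") = true
  · simp only [ht, if_true, Bool.true_and]
    by_cases hc : d.contains (pvEntryGetD r "severity" "unknown") = true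
    · rw [if_pos hc, PySem.Dict.getD_modify]
      rcases eq_or_ne sev (pvEntryGetD r "severity" "unknown") with h | h
      · subst h; simp
      · simp [h, beq_iff_eq, Ne.symm h]
    · rw [if_neg hc, PySem.Dict.getD_modify]
      have h0 : d.getD (pvEntryGetD r "severity" "unknown") [] = [] :=
        PySem.Dict.getD_of_not_contains d _ (by simpa using hc)
      rcases eq_or_ne sev (pvEntryGetD r "severity" "unknown") with h | h
      · subst h; simp [h0]
      · simp [h, beq_iff_eq, Ne.symm h, PySem.Dict.getD_insert]
  · simp [ht]

theorem pvStep_contains (d : PySem.Dict String (List (List (String × String))))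
    (r : List (String × String)) (sev : String) :
    (pvStep d r).contains sev = (d.contains sev || pvPred sev r) := by
  unfold pvStep pvPred
  by_cases ht : (pvEntryGet? r "type" == some "side_effect") = true
  · simp only [ht, if_true, Bool.true_and]
    by_cases hc : d.contains (pvEntryGetD r "severity" "unknown") = true
    · rw [if_pos hc, PySem.Dict.contains_modify]
      rcases eq_or_ne sev (pvEntryGetD r "severity" "unknown") with h | h
      · subst h; simp [hc]
      · have h1 : (sev == pvEntryGetD r "severity" "unknown") = false := by simpa using h
        have h2 : (pvEntryGetD r "severity" "unknown" == sev) = false := by simpa using h.symm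
        simp [h1, h2]
    · rw [if_neg hc, PySem.Dict.contains_modify, PySem.Dict.contains_insert]
      rcases eq_or_ne sev (pvEntryGetD r "severity" "unknown") with h | h
      · subst h; simp [Bool.or_comm]
      · have h1 : (sev == pvEntryGetD r "severity" "unknown") = false := by simpa using h
        have h2 : (pvEntryGetD r "severity" "unknown" == sev) = false := by simpa using h.symm
        simp [h1, h2]
  · simp [ht]

theorem pvFold_getD (l : List (List (String × String)))
    (d : PySem.Dict String (List (List (String × String)))) (sev : String) :
    (l.foldl pvStep d).getD sev [] = d.getD sev [] ++ l.filter (pvPred sev) := by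
  induction l generalizing d with
  | nil => simp
  | cons r t ih =>
    simp only [List.foldl_cons, List.filter_cons, ih, pvStep_getD]
    by_cases h : pvPred sev r <;> simp [h]

theorem pvFold_contains (l : List (List (String × String)))
    (d : PySem.Dict String (List (List (String × String)))) (sev : String) :
    (l.foldl pvStep d).contains sev = (d.contains sev || l.any (pvPred sev)) := by
  induction l generalizing d with
  | nil => simp
  | cons r t ih =>
    simp only [List.foldl_cons, List.any_cons, ih, pvStep_contains]
    cases d.contains sev <;> cases pvPred sev r <;> simp

theorem pvFilter_isEmpty {α : Type} (p : α → Bool) (l : List α) :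
    (l.filter p).isEmpty = !l.any p := by
  induction l with
  | nil => simp
  | cons a t ih => by_cases h : p a <;> simp [h, ih]

-- ===== VERDICT (by name: the statement is the Claim_ definition above) =====
theorem format_side_effects_response_py_spec : Claim_equal_format_side_effects_response_py := by
  intro de rs _ _
  unfold Spec_format_side_effects_response_py
  unfold format_side_effects_response_py format_side_effects_response_py_alt
  have hstep : (fun d result =>
      if pvEntryGet? result "type" == some "side_effect" then
        let severity := pvEntryGetD result "severity" "unknown"
        let d := if d.contains severity then d else d.insert severity []
        d.modify severity [] (fun l => l ++ [result])
      else d) = pvStep := rfl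
  have hpred : ∀ sev : String, (fun r =>
      (pvEntryGet? r "type" == some "side_effect") &&
      (pvEntryGetD r "severity" "unknown" == sev)) = pvPred sev := fun _ => rfl
  simp only [hstep, hpred, List.foldl_cons, List.foldl_nil,
    pvFold_getD, pvFold_contains, pvFilter_isEmpty, Bool.not_not,
    PySem.Dict.contains_empty, PySem.Dict.getD_empty, Bool.false_or, List.nil_append]
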